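-- pv_equiv track=rewrite | github.com/LOlijslager/find_prokaryotic_immune_systems | parse_output.py | remove_internal_conflict
-- ===== SOURCE A (Python) =====
-- def remove_internal_conflict(db_from_self, db_from_other, testing):
--     new_db_from_self = dict()
--     #test internal conflict (systems with differen families assigned but the exact same genes within the DF or PL database)
--     removed_list = []
--     for system1 in db_from_self.keys():
--         remove = False
--         internal_conflict = False
--         for system2 in db_from_self.keys():
--             genes_1 = db_from_self[system1][2]
--             genes_2 = db_from_self[system2][2]
--             genes_set_1 = set(genes_1.split(";"))
--             genes_set_2 = set(genes_2.split(";"))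
--             if genes_set_1 == genes_set_2:
--                 if system1 != system2:
--                     internal_conflict = True
--                     db = db_from_self[system1]
--                     quiet = "not_main"
--                     accession = "not_main"
--                     warning_file = "not_main"
--                     found_by_both_b, part_of_a_whole, part_of_a_whole_longest, overlap_not_part_of_a_whole, different_family_same_system, overlap_not_part_of_a_whole, different_family, no_conflict = find_overlap(db, genes_set_1, db_from_other, accession, testing, quiet, warning_file)
--                     if genes_set_1 in removed_list: #previously merged
--                         remove = True
--                     elif db[0] == db_from_self[system2][0]: #same system family, differen subsystem: merge
--                         new_db_from_self[system1] = db[0], db[1]+"/"+db_from_self[system2][1], db[2], db[3]+"/"+db_from_self[system2][3]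
--                         removed_list.append(genes_set_1)
--                     elif found_by_both_b:
--                         new_db_from_self[system1] = db_from_self[system1] #keep unchanged
--                     elif different_family_same_system:
--                         remove = True #do not test
--                     else: #unique find, merge
--                         new_db_from_self[system1] = db[0]+"/"+db_from_self[system2][0], db[1]+"/"+db_from_self[system2][1], db[2], db[3]+"/"+db_from_self[system2][3]
--                         removed_list.append(genes_set_1)
--         if internal_conflict == False:
--             new_db_from_self[system1] = db_from_self[system1]
--     return new_db_from_self
--
-- def find_overlap(db, genes_set, db_from_other, accession, testing, quiet, warning_file):
--     no_conflict = False
--     found_by_both_b = False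
--     part_of_a_whole_longest = False
--     part_of_a_whole = False
--     overlap_not_part_of_a_whole = False
--     different_family_same_system = False
--     different_family = False
--     internal_conflict = False
--     overlap = False
--
--     #test for conflict between PL and DF
--     conflicting_systems = []
--     for system in db_from_other.keys():
--         genes_from_other = db_from_other[system][2]
--         genes_from_other_set = set(genes_from_other.split(";"))
--         combined_genes_set = genes_set.union(genes_from_other_set)
--         if len (combined_genes_set) < (len(genes_set)+len(genes_from_other_set)):
--             overlap = True
--             conflicting_systems.append(db_from_other[system]) #define which system(s) conflict
--
--     if overlap: #Does the system have overlap with a system from the other?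
--         for conflicting_system in conflicting_systems:
--             genes_from_other_set = set(conflicting_system[2].split(";"))
--             combined_genes_set = genes_set.union(genes_from_other_set)
--             if db[0] == conflicting_system[0]: #Do these systems share the same system family?
--                 if genes_set == genes_from_other_set: #Do they have exactly the same genes?
--                     found_by_both_b = True
--                 else:
--                     if (combined_genes_set == genes_set) or (combined_genes_set == genes_from_other_set): #is one contained in the other?
--                         part_of_a_whole = True
--                         if combined_genes_set == genes_set: #keep longest genes
--                             part_of_a_whole_longest = True
--                     else:
--                         overlap_not_part_of_a_whole = True
--
--             else:
--                 if genes_set == genes_from_other_set: #do they have exactly the same genes?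
--                     different_family_same_system = True
--                     if quiet != "not_main":
--                         if not quiet:
--                             if testing == "DF":
--                                 print ("Warning: same system identified twice. Might need to update reference file. Pertaining: sequence %s, DefenseFinder %s, PADLOC %s, genes %s"%(accession, db[0], conflicting_system[0], db[2]))
--                         with open (warning_file, "a+") as w_f:
--                             w_f.write("Warning: same system identified twice. Might need to update reference file. Pertaining: sequence %s, DefenseFinder %s, PADLOC %s, genes %s \n"%(accession, db[0], conflicting_system[0], db[2]))
--                 else:
--                     overlap_not_part_of_a_whole = True
--                     different_family = True
--     else:
--         no_conflict = True
--
--     return found_by_both_b, part_of_a_whole, part_of_a_whole_longest, overlap_not_part_of_a_whole, different_family_same_system, overlap_not_part_of_a_whole, different_family, no_conflict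
-- ===== SOURCE B (Python) =====
-- def remove_internal_conflict(db_from_self, db_from_other, testing):
--     # Parse each system's gene set once; resolve each group of systems sharing an
--     # identical gene set in a single pass, consulting the other database at most
--     # once per conflicted system.
--     entries = [(s, v, frozenset(v[2].split(";"))) for s, v in db_from_self.items()]
--     out = {}
--     merged = []  # gene sets whose group has already been merged into an earlier system
--     for s1, v1, g1 in entries:
--         partners = [v2 for s2, v2, g2 in entries if s2 != s1 and g2 == g1]
--         if not partners:
--             out[s1] = v1
--         elif g1 in merged:
--             pass  # group already handled
--         else:
--             other_fams = [ov[0] for ov in db_from_other.values()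
--                           if g1 == frozenset(ov[2].split(";"))]
--             if other_fams:
--                 # the other database also reports this exact gene set: trust families
--                 p = next((w for w in partners if v1[0] == w[0]), None)
--                 if p is not None:  # merge with a same-family partner
--                     out[s1] = (v1[0], v1[1] + "/" + p[1], v1[2], v1[3] + "/" + p[3])
--                     merged.append(g1)
--                 elif v1[0] in other_fams:  # family confirmed by the other database: keep
--                     out[s1] = v1
--                 # else: the other database assigns a different family: drop
--             else:
--                 # unique to this database: merge with the first partner,
--                 # combining the family names when they differ
--                 p = partners[0]
--                 if v1[0] == p[0]:
--                     out[s1] = (v1[0], v1[1] + "/" + p[1], v1[2], v1[3] + "/" + p[3])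
--                 else:
--                     out[s1] = (v1[0] + "/" + p[0], v1[1] + "/" + p[1],
--                                v1[2], v1[3] + "/" + p[3])
--                 merged.append(g1)
--     return out
-- ===== Notes on version B (the rewrite author's own statement) =====
-- stated objective: faster
-- what changed: B parses each system's gene set once up front, resolves each system against the precomputed list of equal-gene-set partners, and consults the other database at most once per conflicted system, instead of A's nested key loop that re-splits gene strings and re-runs find_overlap over the whole other database for every conflicting pair; Pre_ excludes duplicate-key association lists (not a Python dict) and records too short for A's tuple indexing, on which A raises IndexError except on some conflicted systems A resolves without reading index 3.
import Mathlib
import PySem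

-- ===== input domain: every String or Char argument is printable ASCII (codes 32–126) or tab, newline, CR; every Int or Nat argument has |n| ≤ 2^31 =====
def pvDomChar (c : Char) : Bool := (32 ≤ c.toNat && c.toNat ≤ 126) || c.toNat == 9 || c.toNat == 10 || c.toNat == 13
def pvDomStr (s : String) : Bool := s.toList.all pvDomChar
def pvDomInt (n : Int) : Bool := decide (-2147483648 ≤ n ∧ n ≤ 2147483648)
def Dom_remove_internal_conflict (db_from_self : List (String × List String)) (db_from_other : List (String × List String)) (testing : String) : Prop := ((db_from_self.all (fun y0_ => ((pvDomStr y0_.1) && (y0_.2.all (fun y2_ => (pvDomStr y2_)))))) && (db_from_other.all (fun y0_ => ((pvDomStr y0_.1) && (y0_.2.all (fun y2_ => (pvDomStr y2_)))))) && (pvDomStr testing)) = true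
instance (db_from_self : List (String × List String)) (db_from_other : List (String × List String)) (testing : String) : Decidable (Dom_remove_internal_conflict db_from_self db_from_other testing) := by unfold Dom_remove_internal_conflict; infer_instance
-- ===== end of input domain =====

-- B parses each gene set once and resolves each equal-gene-set group in one pass,
-- consulting the other database at most once per conflicted system; equivalence of the
-- returned dict (as an insertion-ordered association list) is proved on Pre_ below.

-- ===== PORT A =====

-- s.split(";") — the separator is non-empty, so Python's split never raises and split? is always some
def pvSplitGenes (s : String) : List String := (PySem.Str.split? s ";").getD []

-- set(v[2].split(";")) — v[2] is in range on Pre_, so the total pyGetD default is never used there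
def pvGset (v : List String) : PySem.Set String :=
  PySem.Set.ofList (pvSplitGenes (PySem.List.pyGetD v 2 ""))

-- literal port of find_overlap; quiet = "not_main" in every call made by A, so the
-- print/warning-file branch (guarded by quiet != "not_main") is a no-op and ports to nothing
def pv_find_overlap (db : List String) (genes_set : PySem.Set String)
    (db_from_other : List (String × List String)) (_accession _testing _quiet _warning_file : String) :
    Bool × Bool × Bool × Bool × Bool × Bool × Bool × Bool :=
  let first := db_from_other.foldl (fun (st : Bool × List (List String)) p =>
      let goset := pvGset p.2
      if PySem.Set.len (PySem.Set.union genes_set goset)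
          < PySem.Set.len genes_set + PySem.Set.len goset
      then (true, st.2 ++ [p.2]) else st) (false, [])
  let overlap := first.1
  let conflicting := first.2
  if overlap then
    let fl := conflicting.foldl (fun (st : Bool × Bool × Bool × Bool × Bool × Bool) cs =>
        let (fbb, paw, pawl, onp, dfss, df) := st
        let goset := pvGset cs
        let combined := PySem.Set.union genes_set goset
        if PySem.List.pyGetD db 0 "" = PySem.List.pyGetD cs 0 "" then
          if PySem.Set.equal genes_set goset then (true, paw, pawl, onp, dfss, df)
          else if PySem.Set.equal combined genes_set || PySem.Set.equal combined goset then
            (fbb, true, (if PySem.Set.equal combined genes_set then true else pawl), onp, dfss, df)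
          else (fbb, paw, pawl, true, dfss, df)
        else
          if PySem.Set.equal genes_set goset then (fbb, paw, pawl, onp, true, df)
          else (fbb, paw, pawl, true, dfss, true))
      (false, false, false, false, false, false)
    (fl.1, fl.2.1, fl.2.2.1, fl.2.2.2.1, fl.2.2.2.2.1, fl.2.2.2.1, fl.2.2.2.2.2, false)
  else
    (false, false, false, false, false, false, false, true)

-- one iteration of A's inner 'for system2' loop; state = (remove, internal_conflict, new_db, removed_list)
-- (dict lookups of the iterated keys are their paired values: keys are unique on Pre_)
def pv_inner (db_from_other : List (String × List String)) (testing : String)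
    (s1 : String) (v1 : List String)
    (st : Bool × Bool × PySem.Dict String (List String) × List (PySem.Set String))
    (p : String × List String) :
    Bool × Bool × PySem.Dict String (List String) × List (PySem.Set String) :=
  let (remove, ic, d, removed) := st
  let gs1 := pvGset v1
  let gs2 := pvGset p.2
  if PySem.Set.equal gs1 gs2 then
    if s1 ≠ p.1 then
      let db := v1
      let r := pv_find_overlap db gs1 db_from_other "not_main" testing "not_main" "not_main"
      let found_by_both_b := r.1
      let different_family_same_system := r.2.2.2.2.1
      if removed.any (fun s => PySem.Set.equal gs1 s) then (true, true, d, removed)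
      else if PySem.List.pyGetD db 0 "" = PySem.List.pyGetD p.2 0 "" then
        (remove, true,
         d.insert s1 [PySem.List.pyGetD db 0 "",
                      PySem.List.pyGetD db 1 "" ++ "/" ++ PySem.List.pyGetD p.2 1 "",
                      PySem.List.pyGetD db 2 "",
                      PySem.List.pyGetD db 3 "" ++ "/" ++ PySem.List.pyGetD p.2 3 ""],
         removed ++ [gs1])
      else if found_by_both_b then (remove, true, d.insert s1 v1, removed)
      else if different_family_same_system then (true, true, d, removed)
      else
        (remove, true,
         d.insert s1 [PySem.List.pyGetD db 0 "" ++ "/" ++ PySem.List.pyGetD p.2 0 "",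
                      PySem.List.pyGetD db 1 "" ++ "/" ++ PySem.List.pyGetD p.2 1 "",
                      PySem.List.pyGetD db 2 "",
                      PySem.List.pyGetD db 3 "" ++ "/" ++ PySem.List.pyGetD p.2 3 ""],
         removed ++ [gs1])
    else (remove, ic, d, removed)
  else (remove, ic, d, removed)

def remove_internal_conflict (db_from_self : List (String × List String)) (db_from_other : List (String × List String)) (testing : String) : List (String × List String) :=
  let fin := db_from_self.foldl
    (fun (st : PySem.Dict String (List String) × List (PySem.Set String)) p =>
      let r := db_from_self.foldl (pv_inner db_from_other testing p.1 p.2) (false, false, st.1, st.2)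
      let internal_conflict := r.2.1
      if internal_conflict = false then (r.2.2.1.insert p.1 p.2, r.2.2.2) else (r.2.2.1, r.2.2.2))
    (PySem.Dict.empty, [])
  fin.1.items

-- ===== PORT B =====

-- merged record values (A builds these tuples inline; B names them)
def pvFamMerge (v1 w : List String) : List String :=
  [PySem.List.pyGetD v1 0 "",
   PySem.List.pyGetD v1 1 "" ++ "/" ++ PySem.List.pyGetD w 1 "",
   PySem.List.pyGetD v1 2 "",
   PySem.List.pyGetD v1 3 "" ++ "/" ++ PySem.List.pyGetD w 3 ""]

def pvCrossMerge (v1 w : List String) : List String :=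
  [PySem.List.pyGetD v1 0 "" ++ "/" ++ PySem.List.pyGetD w 0 "",
   PySem.List.pyGetD v1 1 "" ++ "/" ++ PySem.List.pyGetD w 1 "",
   PySem.List.pyGetD v1 2 "",
   PySem.List.pyGetD v1 3 "" ++ "/" ++ PySem.List.pyGetD w 3 ""]

def remove_internal_conflict_alt (db_from_self : List (String × List String)) (db_from_other : List (String × List String)) (testing : String) : List (String × List String) :=
  let entries := db_from_self.map (fun p => (p.1, p.2, pvGset p.2))
  let fin := entries.foldl
    (fun (st : PySem.Dict String (List String) × List (PySem.Set String)) e =>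
      let (out, merged) := st
      let (s1, v1, g1) := e
      let partners := (entries.filter (fun q => (!(q.1 == s1)) && PySem.Set.equal g1 q.2.2)).map
        (fun q => q.2.1)
      match partners with
      | [] => (out.insert s1 v1, merged)
      | w :: _ =>
        if merged.any (fun s => PySem.Set.equal g1 s) then (out, merged)
        else
          let other_fams := (db_from_other.filter (fun o => PySem.Set.equal g1 (pvGset o.2))).map
            (fun o => PySem.List.pyGetD o.2 0 "")
          if !other_fams.isEmpty then
            match partners.find? (fun w' => PySem.List.pyGetD v1 0 "" == PySem.List.pyGetD w' 0 "") with
            | some pw => (out.insert s1 (pvFamMerge v1 pw), merged ++ [g1])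
            | none =>
              if other_fams.contains (PySem.List.pyGetD v1 0 "") then (out.insert s1 v1, merged)
              else (out, merged)
          else
            if PySem.List.pyGetD v1 0 "" == PySem.List.pyGetD w 0 "" then
              (out.insert s1 (pvFamMerge v1 w), merged ++ [g1])
            else (out.insert s1 (pvCrossMerge v1 w), merged ++ [g1]))
    (PySem.Dict.empty, [])
  fin.1.items

-- ===== PRECONDITION & SPEC =====
-- Pre_ excludes (a) association lists with duplicate keys, which do not denote a Python dict
-- (A receives dicts, where later duplicates silently overwrite), (b) records too short for
-- A's tuple indexing — a self value needs index 2 always and indices 0–3 once it shares its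
-- gene set with another key, and other values need index 2 once any such conflict exists —
-- on which A raises IndexError except on some conflicted systems A resolves without reading
-- index 3.
def Pre_remove_internal_conflict (db_from_self : List (String × List String)) (db_from_other : List (String × List String)) (testing : String) : Prop :=
  (db_from_self.map Prod.fst).Nodup ∧ (db_from_other.map Prod.fst).Nodup ∧
  (∀ p ∈ db_from_self, 3 ≤ p.2.length) ∧
  (∀ p ∈ db_from_self,
    (∃ q ∈ db_from_self, q.1 ≠ p.1 ∧ PySem.Set.equal (pvGset p.2) (pvGset q.2) = true) →
    4 ≤ p.2.length) ∧
  ((∃ p ∈ db_from_self, ∃ q ∈ db_from_self,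
      q.1 ≠ p.1 ∧ PySem.Set.equal (pvGset p.2) (pvGset q.2) = true) →
    ∀ o ∈ db_from_other, 3 ≤ o.2.length)
instance (db_from_self : List (String × List String)) (db_from_other : List (String × List String)) (testing : String) : Decidable (Pre_remove_internal_conflict db_from_self db_from_other testing) := by unfold Pre_remove_internal_conflict; infer_instance

def pvWitness_remove_internal_conflict : (List (String × List String)) × (List (String × List String)) × String :=
  ([("a", ["F", "x", "g1;g2", "n"]), ("b", ["F", "y", "g2;g1", "m"])], [("o1", ["F", "z", "g1"])], "DF")

def Spec_remove_internal_conflict (db_from_self : List (String × List String)) (db_from_other : List (String × List String)) (testing : String) (out : List (String × List String)) : Prop := out = remove_internal_conflict_alt db_from_self db_from_other testing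
instance (db_from_self : List (String × List String)) (db_from_other : List (String × List String)) (testing : String) (out : List (String × List String)) : Decidable (Spec_remove_internal_conflict db_from_self db_from_other testing out) := by unfold Spec_remove_internal_conflict; infer_instance

-- ===== CLAIM (what is proved, stated in full; the proofs are below) =====
def Claim_equal_remove_internal_conflict : Prop := ∀ (db_from_self : List (String × List String)) (db_from_other : List (String × List String)) (testing : String), Dom_remove_internal_conflict db_from_self db_from_other testing → Pre_remove_internal_conflict db_from_self db_from_other testing → Spec_remove_internal_conflict db_from_self db_from_other testing (remove_internal_conflict db_from_self db_from_other testing)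

-- ===== LEMMAS AND PROOFS =====

-- proof-side: the found_by_both / different_family_same_system flags in one scan
def pv_overlap_flags (family : String) (genes_set : PySem.Set String)
    (db_from_other : List (String × List String)) : Bool × Bool :=
  db_from_other.foldl (fun (st : Bool × Bool) p =>
    if PySem.Set.equal genes_set (pvGset p.2) then
      if family == PySem.List.pyGetD p.2 0 "" then (true, st.2) else (st.1, true)
    else st) (false, false)

-- proof-side abbreviations
def pvOv (g : PySem.Set String) (v : List String) : Bool :=
  decide (PySem.Set.len (PySem.Set.union g (pvGset v)) < PySem.Set.len g + PySem.Set.len (pvGset v))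

def pvIsM (s1 : String) (g1 : PySem.Set String) (q : String × List String) : Bool :=
  (!(q.1 == s1)) && PySem.Set.equal g1 (pvGset q.2)

def pvCEq (R : List (PySem.Set String)) (g : PySem.Set String) : Bool :=
  R.any (fun s => PySem.Set.equal g s)

def pvFamP (v1 : List String) (q : String × List String) : Bool :=
  PySem.List.pyGetD v1 0 "" == PySem.List.pyGetD q.2 0 ""

-- outcome of A's inner loop over suffix l, expressed through the first match
def pvInnerOut (other : List (String × List String)) (s1 : String) (v1 : List String)
    (l : List (String × List String)) (d : PySem.Dict String (List String))
    (R : List (PySem.Set String)) :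
    PySem.Dict String (List String) × List (PySem.Set String) :=
  match l.find? (pvIsM s1 (pvGset v1)) with
  | none => (d, R)
  | some q =>
    if pvFamP v1 q then (d.insert s1 (pvFamMerge v1 q.2), R ++ [pvGset v1])
    else
      let fl := pv_overlap_flags (PySem.List.pyGetD v1 0 "") (pvGset v1) other
      if fl.1 || fl.2 then
        match l.find? (fun q' => pvIsM s1 (pvGset v1) q' && pvFamP v1 q') with
        | some f => (d.insert s1 (pvFamMerge v1 f.2), R ++ [pvGset v1])
        | none => (if fl.1 then d.insert s1 v1 else d, R)
      else (d.insert s1 (pvCrossMerge v1 q.2), R ++ [pvGset v1])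

lemma pv_go_ne_nil (sep : List Char) : ∀ (fuel : Nat) (l cur : List Char) (acc : List (List Char)),
    PySem.Chars.splitOn.go sep fuel l cur acc ≠ [] := by
  intro fuel
  induction fuel with
  | zero => intro l cur acc; simp [PySem.Chars.splitOn.go]
  | succ n ih =>
    intro l cur acc
    cases l with
    | nil => simp [PySem.Chars.splitOn.go]
    | cons c rest =>
      rw [PySem.Chars.splitOn.go]
      split
      · exact ih _ _ _
      · exact ih _ _ _

lemma pvSplitGenes_ne_nil (s : String) : pvSplitGenes s ≠ [] := by
  simp [pvSplitGenes, PySem.Str.split?, PySem.Chars.split?, PySem.Chars.splitOn]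
  exact pv_go_ne_nil _ _ _ _ _

lemma pvGset_ne_nil (v : List String) : pvGset v ≠ [] := by
  unfold pvGset
  cases h : pvSplitGenes (PySem.List.pyGetD v 2 "") with
  | nil => exact absurd h (pvSplitGenes_ne_nil _)
  | cons x xs => simp [PySem.Set.ofList_cons]

lemma pv_equal_refl (g : PySem.Set String) : PySem.Set.equal g g = true := by
  simp [PySem.Set.equal_iff]

lemma pv_equal_ov (g : PySem.Set String) (v : List String)
    (h : PySem.Set.equal g (pvGset v) = true) : pvOv g v = true := by
  have hu : PySem.Set.union g (pvGset v) = g := by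
    show PySem.Set.update g (pvGset v) = g
    rw [PySem.Set.update_eq_append_filter]
    have hnil : List.filter (fun y => !g.contains y) (PySem.Set.ofList (pvGset v)) = [] := by
      rw [List.filter_eq_nil_iff]
      intro a ha
      have : a ∈ g :=
        ((PySem.Set.equal_iff g _).1 h a).2 ((PySem.Set.mem_ofList _ _).1 ha)
      simpa using this
    rw [hnil, List.append_nil]
  have hlen : 0 < (pvGset v).length := List.length_pos_iff.2 (pvGset_ne_nil v)
  simp only [pvOv, hu, PySem.Set.len, decide_eq_true_eq]
  omega

lemma pv_find?_and_none {α : Type} {p r : α → Bool} {l : List α} (h : l.find? p = none) :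
    l.find? (fun x => p x && r x) = none := by
  rw [List.find?_eq_none] at *
  intro x hx; simp [h x hx]

lemma pv_find?_and_self {α : Type} {p r : α → Bool} {l : List α} {x : α}
    (h : l.find? p = some x) (hr : r x = true) :
    l.find? (fun y => p y && r y) = some x := by
  induction l with
  | nil => simp at h
  | cons a l ih =>
    by_cases ha : p a = true
    · rw [List.find?_cons_of_pos ha] at h
      cases h
      rw [List.find?_cons_of_pos (by simp [ha, hr])]
    · rw [List.find?_cons_of_neg (by simp [ha])] at h
      rw [List.find?_cons_of_neg (by simp [ha]), ih h]

lemma pv_foldl_or {σ β : Type} (f : σ → β → σ) (proj : σ → Bool) (p : β → Bool)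
    (h : ∀ s b, proj (f s b) = (proj s || p b)) :
    ∀ (l : List β) (s : σ), proj (l.foldl f s) = (proj s || l.any p) := by
  intro l
  induction l with
  | nil => intro s; simp
  | cons b l ih =>
    intro s
    rw [List.foldl_cons, ih, h, List.any_cons, Bool.or_assoc]

lemma pv_fo1 (g : PySem.Set String) :
    ∀ (l : List (String × List String)) (b : Bool) (cs : List (List String)),
    l.foldl (fun (st : Bool × List (List String)) p =>
      let goset := pvGset p.2
      if PySem.Set.len (PySem.Set.union g goset)
          < PySem.Set.len g + PySem.Set.len goset
      then (true, st.2 ++ [p.2]) else st) (b, cs)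
    = (b || l.any (fun p => pvOv g p.2),
       cs ++ (l.filter (fun p => pvOv g p.2)).map Prod.snd) := by
  intro l
  induction l with
  | nil => intro b cs; simp
  | cons p l ih =>
    intro b cs
    by_cases h : PySem.Set.len (PySem.Set.union g (pvGset p.2))
        < PySem.Set.len g + PySem.Set.len (pvGset p.2)
    · have hov : pvOv g p.2 = true := by simp only [pvOv, decide_eq_true_eq]; exact h
      simp only [List.foldl_cons, if_pos h, ih, List.any_cons, List.filter_cons, hov]
      simp
    · have hov : pvOv g p.2 = false := by simp only [pvOv, decide_eq_false_iff_not]; exact h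
      simp only [List.foldl_cons, if_neg h, ih, List.any_cons, List.filter_cons, hov]
      simp

lemma pv_fo2_fbb (g : PySem.Set String) (db : List String) :
    ∀ (c : List (List String)) (st : Bool × Bool × Bool × Bool × Bool × Bool),
    (c.foldl (fun (st : Bool × Bool × Bool × Bool × Bool × Bool) cs =>
        let (fbb, paw, pawl, onp, dfss, df) := st
        let goset := pvGset cs
        let combined := PySem.Set.union g goset
        if PySem.List.pyGetD db 0 "" = PySem.List.pyGetD cs 0 "" then
          if PySem.Set.equal g goset then (true, paw, pawl, onp, dfss, df)
          else if PySem.Set.equal combined g || PySem.Set.equal combined goset then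
            (fbb, true, (if PySem.Set.equal combined g then true else pawl), onp, dfss, df)
          else (fbb, paw, pawl, true, dfss, df)
        else
          if PySem.Set.equal g goset then (fbb, paw, pawl, onp, true, df)
          else (fbb, paw, pawl, true, dfss, true)) st).1
    = (st.1 || c.any (fun cs =>
        decide (PySem.List.pyGetD db 0 "" = PySem.List.pyGetD cs 0 "") && PySem.Set.equal g (pvGset cs))) := by
  intro c st
  refine pv_foldl_or _ (fun t => t.1) _ ?_ c st
  intro s b
  obtain ⟨f, p, pl, o, ds, df⟩ := s
  dsimp only
  split_ifs <;> simp_all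

lemma pv_fo2_dfss (g : PySem.Set String) (db : List String) :
    ∀ (c : List (List String)) (st : Bool × Bool × Bool × Bool × Bool × Bool),
    (c.foldl (fun (st : Bool × Bool × Bool × Bool × Bool × Bool) cs =>
        let (fbb, paw, pawl, onp, dfss, df) := st
        let goset := pvGset cs
        let combined := PySem.Set.union g goset
        if PySem.List.pyGetD db 0 "" = PySem.List.pyGetD cs 0 "" then
          if PySem.Set.equal g goset then (true, paw, pawl, onp, dfss, df)
          else if PySem.Set.equal combined g || PySem.Set.equal combined goset then
            (fbb, true, (if PySem.Set.equal combined g then true else pawl), onp, dfss, df)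
          else (fbb, paw, pawl, true, dfss, df)
        else
          if PySem.Set.equal g goset then (fbb, paw, pawl, onp, true, df)
          else (fbb, paw, pawl, true, dfss, true)) st).2.2.2.2.1
    = (st.2.2.2.2.1 || c.any (fun cs =>
        (!decide (PySem.List.pyGetD db 0 "" = PySem.List.pyGetD cs 0 "")) && PySem.Set.equal g (pvGset cs))) := by
  intro c st
  refine pv_foldl_or _ (fun t => t.2.2.2.2.1) _ ?_ c st
  intro s b
  obtain ⟨f, p, pl, o, ds, df⟩ := s
  dsimp only
  split_ifs <;> simp_all

lemma pv_oflags_fst (fam : String) (g : PySem.Set String) (l : List (String × List String)) :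
    (pv_overlap_flags fam g l).1
    = l.any (fun p => PySem.Set.equal g (pvGset p.2) && (fam == PySem.List.pyGetD p.2 0 "")) := by
  have h := pv_foldl_or
    (f := fun (st : Bool × Bool) (p : String × List String) =>
      if PySem.Set.equal g (pvGset p.2) then
        if fam == PySem.List.pyGetD p.2 0 "" then (true, st.2) else (st.1, true)
      else st)
    (proj := fun t => t.1)
    (p := fun p => PySem.Set.equal g (pvGset p.2) && (fam == PySem.List.pyGetD p.2 0 ""))
    (by intro s b; obtain ⟨x, y⟩ := s; dsimp only; split_ifs <;> simp_all) l (false, false)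
  simpa [pv_overlap_flags] using h

lemma pv_oflags_snd (fam : String) (g : PySem.Set String) (l : List (String × List String)) :
    (pv_overlap_flags fam g l).2
    = l.any (fun p => PySem.Set.equal g (pvGset p.2) && (!(fam == PySem.List.pyGetD p.2 0 ""))) := by
  have h := pv_foldl_or
    (f := fun (st : Bool × Bool) (p : String × List String) =>
      if PySem.Set.equal g (pvGset p.2) then
        if fam == PySem.List.pyGetD p.2 0 "" then (true, st.2) else (st.1, true)
      else st)
    (proj := fun t => t.2)
    (p := fun p => PySem.Set.equal g (pvGset p.2) && (!(fam == PySem.List.pyGetD p.2 0 "")))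
    (by intro s b; obtain ⟨x, y⟩ := s; dsimp only; split_ifs <;> simp_all) l (false, false)
  simpa [pv_overlap_flags] using h

lemma pv_fo_flags (db : List String) (g : PySem.Set String)
    (other : List (String × List String)) (a t q w : String) :
    (pv_find_overlap db g other a t q w).1 = (pv_overlap_flags (PySem.List.pyGetD db 0 "") g other).1 ∧
    (pv_find_overlap db g other a t q w).2.2.2.2.1 = (pv_overlap_flags (PySem.List.pyGetD db 0 "") g other).2 := by
  unfold pv_find_overlap
  rw [pv_fo1]
  simp only [Bool.false_or, List.nil_append]
  by_cases hov : other.any (fun p => pvOv g p.2) = true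
  · rw [if_pos (by simp [hov])]
    dsimp only
    rw [pv_fo2_fbb, pv_fo2_dfss, pv_oflags_fst, pv_oflags_snd]
    simp only [Bool.false_or, List.any_map, List.any_filter]
    constructor
    · apply PySem.List.any_congr_mem
      intro x _
      by_cases he : PySem.Set.equal g (pvGset x.2) = true
      · simp [pv_equal_ov g _ he, he, Function.comp, Bool.and_comm, Bool.beq_eq_decide_eq]
      · simp [he, Function.comp]
    · apply PySem.List.any_congr_mem
      intro x _
      by_cases he : PySem.Set.equal g (pvGset x.2) = true
      · simp [pv_equal_ov g _ he, he, Function.comp, Bool.and_comm, Bool.beq_eq_decide_eq]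
      · simp [he, Function.comp]
  · rw [if_neg (by simp [hov])]
    dsimp only
    rw [pv_oflags_fst, pv_oflags_snd]
    have hall : ∀ x ∈ other, pvOv g x.2 = false := by
      intro x hx
      have := (List.any_eq_false.1 (Bool.not_eq_true _ ▸ hov)) x hx
      simpa using this
    constructor
    · symm
      rw [List.any_eq_false]
      intro x hx
      by_cases he : PySem.Set.equal g (pvGset x.2) = true
      · exact absurd (pv_equal_ov g _ he) (by simp [hall x hx])
      · simp [he]
    · symm
      rw [List.any_eq_false]
      intro x hx
      by_cases he : PySem.Set.equal g (pvGset x.2) = true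
      · exact absurd (pv_equal_ov g _ he) (by simp [hall x hx])
      · simp [he]

lemma pv_inner_merged (other : List (String × List String)) (testing s1 : String) (v1 : List String) :
    ∀ (l : List (String × List String)) (rm ic : Bool) (d : PySem.Dict String (List String))
      (R : List (PySem.Set String)), pvCEq R (pvGset v1) = true →
    l.foldl (pv_inner other testing s1 v1) (rm, ic, d, R)
    = (rm || l.any (pvIsM s1 (pvGset v1)), ic || l.any (pvIsM s1 (pvGset v1)), d, R) := by
  intro l
  induction l with
  | nil => intro rm ic d R _; simp
  | cons p l ih =>
    intro rm ic d R hR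
    rw [List.foldl_cons]
    by_cases he : PySem.Set.equal (pvGset v1) (pvGset p.2) = true
    · by_cases hs : s1 = p.1
      · have hm : pvIsM s1 (pvGset v1) p = false := by simp [pvIsM, hs]
        have hstep : pv_inner other testing s1 v1 (rm, ic, d, R) p = (rm, ic, d, R) := by
          simp only [pv_inner]
          rw [if_pos he, if_neg (by simp [hs])]
        rw [hstep, ih rm ic d R hR]
        simp [hm]
      · have hm : pvIsM s1 (pvGset v1) p = true := by simp [pvIsM, he, Ne.symm hs]
        have hstep : pv_inner other testing s1 v1 (rm, ic, d, R) p = (true, true, d, R) := by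
          simp only [pv_inner]
          rw [if_pos he, if_pos hs, if_pos (show (R.any fun s => (pvGset v1).equal s) = true from hR)]
        rw [hstep, ih true true d R hR]
        simp [hm]
    · have hm : pvIsM s1 (pvGset v1) p = false := by simp [pvIsM, he]
      have hstep : pv_inner other testing s1 v1 (rm, ic, d, R) p = (rm, ic, d, R) := by
        simp only [pv_inner]
        rw [if_neg he]
      rw [hstep, ih rm ic d R hR]
      simp [hm]

lemma pv_innerOut_skip (other : List (String × List String)) (s1 : String) (v1 : List String)
    (p : String × List String) (l : List (String × List String))
    (d : PySem.Dict String (List String)) (R : List (PySem.Set String))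
    (hm : pvIsM s1 (pvGset v1) p = false) :
    pvInnerOut other s1 v1 (p :: l) d R = pvInnerOut other s1 v1 l d R := by
  unfold pvInnerOut
  rw [List.find?_cons_of_neg (by simp [hm]), List.find?_cons_of_neg (by simp [hm])]

lemma pv_innerOut_fbb_step (other : List (String × List String)) (s1 : String) (v1 : List String)
    (p : String × List String) (l : List (String × List String))
    (d : PySem.Dict String (List String)) (R : List (PySem.Set String))
    (hm : pvIsM s1 (pvGset v1) p = true) (hf : pvFamP v1 p = false)
    (h1 : (pv_overlap_flags (PySem.List.pyGetD v1 0 "") (pvGset v1) other).1 = true) :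
    pvInnerOut other s1 v1 (p :: l) d R = pvInnerOut other s1 v1 l (d.insert s1 v1) R := by
  unfold pvInnerOut
  rw [List.find?_cons_of_pos hm, List.find?_cons_of_neg (by simp [hf])]
  dsimp only
  rw [if_neg (by simp [hf]), if_pos (by simp [h1])]
  cases hfind : l.find? (pvIsM s1 (pvGset v1)) with
  | none =>
    dsimp only
    rw [pv_find?_and_none hfind]
    dsimp only
    rw [if_pos h1]
  | some q2 =>
    dsimp only
    by_cases hq2 : pvFamP v1 q2 = true
    · rw [pv_find?_and_self hfind hq2]
      dsimp only
      rw [if_pos hq2, PySem.Dict.insert_insert_self]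
    · rw [if_neg hq2]
      have hor : ((pv_overlap_flags (PySem.List.pyGetD v1 0 "") (pvGset v1) other).1 ||
          (pv_overlap_flags (PySem.List.pyGetD v1 0 "") (pvGset v1) other).2) = true := by
        simp [h1]
      rw [if_pos hor]
      cases hcf : l.find? (fun q' => pvIsM s1 (pvGset v1) q' && pvFamP v1 q') with
      | none =>
        dsimp only
        rw [if_pos h1, if_pos h1, PySem.Dict.insert_insert_self]
      | some f =>
        dsimp only
        rw [PySem.Dict.insert_insert_self]

lemma pv_innerOut_dfss_step (other : List (String × List String)) (s1 : String) (v1 : List String)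
    (p : String × List String) (l : List (String × List String))
    (d : PySem.Dict String (List String)) (R : List (PySem.Set String))
    (hm : pvIsM s1 (pvGset v1) p = true) (hf : pvFamP v1 p = false)
    (h1 : (pv_overlap_flags (PySem.List.pyGetD v1 0 "") (pvGset v1) other).1 = false)
    (h2 : (pv_overlap_flags (PySem.List.pyGetD v1 0 "") (pvGset v1) other).2 = true) :
    pvInnerOut other s1 v1 (p :: l) d R = pvInnerOut other s1 v1 l d R := by
  unfold pvInnerOut
  rw [List.find?_cons_of_pos hm, List.find?_cons_of_neg (by simp [hf])]
  dsimp only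
  rw [if_neg (by simp [hf]), if_pos (by simp [h2])]
  cases hfind : l.find? (pvIsM s1 (pvGset v1)) with
  | none =>
    dsimp only
    rw [pv_find?_and_none hfind]
    dsimp only
    rw [if_neg (by simp [h1])]
  | some q2 =>
    dsimp only
    by_cases hq2 : pvFamP v1 q2 = true
    · rw [pv_find?_and_self hfind hq2]
      dsimp only
      rw [if_pos hq2]
    · rw [if_neg hq2]
      have hor : ((pv_overlap_flags (PySem.List.pyGetD v1 0 "") (pvGset v1) other).1 ||
          (pv_overlap_flags (PySem.List.pyGetD v1 0 "") (pvGset v1) other).2) = true := by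
        simp [h2]
      rw [if_pos hor]

lemma pv_inner_active (other : List (String × List String)) (testing s1 : String) (v1 : List String) :
    ∀ (l : List (String × List String)) (rm ic : Bool) (d : PySem.Dict String (List String))
      (R : List (PySem.Set String)), pvCEq R (pvGset v1) = false →
    ∃ rm', l.foldl (pv_inner other testing s1 v1) (rm, ic, d, R)
    = (rm', ic || l.any (pvIsM s1 (pvGset v1)),
       (pvInnerOut other s1 v1 l d R).1, (pvInnerOut other s1 v1 l d R).2) := by
  intro l
  induction l with
  | nil => intro rm ic d R _; exact ⟨rm, by simp [pvInnerOut]⟩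
  | cons p l ih =>
    intro rm ic d R hR
    rw [List.foldl_cons]
    by_cases he : PySem.Set.equal (pvGset v1) (pvGset p.2) = true
    · by_cases hs : s1 = p.1
      · -- not a match: key equal
        have hm : pvIsM s1 (pvGset v1) p = false := by simp [pvIsM, hs]
        have hstep : pv_inner other testing s1 v1 (rm, ic, d, R) p = (rm, ic, d, R) := by
          simp only [pv_inner]
          rw [if_pos he, if_neg (by simp [hs])]
        obtain ⟨rm', hrec⟩ := ih rm ic d R hR
        exact ⟨rm', by rw [hstep, hrec, pv_innerOut_skip other s1 v1 p l d R hm]; simp [hm]⟩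
      · have hm : pvIsM s1 (pvGset v1) p = true := by simp [pvIsM, he, Ne.symm hs]
        by_cases hfam : PySem.List.pyGetD v1 0 "" = PySem.List.pyGetD p.2 0 ""
        · -- same family: merge and enter merged mode
          have hstep : pv_inner other testing s1 v1 (rm, ic, d, R) p
              = (rm, true, d.insert s1 (pvFamMerge v1 p.2), R ++ [pvGset v1]) := by
            simp only [pv_inner, pvFamMerge]
            rw [if_pos he, if_pos hs,
              if_neg (show ¬(R.any fun s => (pvGset v1).equal s) = true by rw [← pvCEq]; simp [hR]),
              if_pos hfam]
          have hR' : pvCEq (R ++ [pvGset v1]) (pvGset v1) = true := by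
            simp [pvCEq, pv_equal_refl]
          rw [hstep, pv_inner_merged other testing s1 v1 l rm true _ _ hR']
          refine ⟨rm || l.any (pvIsM s1 (pvGset v1)), ?_⟩
          have hout : pvInnerOut other s1 v1 (p :: l) d R
              = (d.insert s1 (pvFamMerge v1 p.2), R ++ [pvGset v1]) := by
            unfold pvInnerOut
            rw [List.find?_cons_of_pos hm]
            dsimp only
            rw [if_pos (show pvFamP v1 p = true by simp [pvFamP, hfam])]
          rw [hout]
          simp [hm]
        · have hfp : pvFamP v1 p = false := by simp [pvFamP, hfam]
          have hfl := pv_fo_flags v1 (pvGset v1) other "not_main" testing "not_main" "not_main"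
          by_cases h1 : (pv_overlap_flags (PySem.List.pyGetD v1 0 "") (pvGset v1) other).1 = true
          · -- found_by_both: keep unchanged, stay active
            have hstep : pv_inner other testing s1 v1 (rm, ic, d, R) p
                = (rm, true, d.insert s1 v1, R) := by
              simp only [pv_inner]
              rw [if_pos he, if_pos hs,
                if_neg (show ¬(R.any fun s => (pvGset v1).equal s) = true by rw [← pvCEq]; simp [hR]),
                if_neg hfam, if_pos (by rw [hfl.1]; exact h1)]
            obtain ⟨rm', hrec⟩ := ih rm true (d.insert s1 v1) R hR
            refine ⟨rm', ?_⟩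
            rw [hstep, hrec, ← pv_innerOut_fbb_step other s1 v1 p l d R hm hfp h1]
            simp [hm]
          · by_cases h2 : (pv_overlap_flags (PySem.List.pyGetD v1 0 "") (pvGset v1) other).2 = true
            · -- different family, same system: skip, stay active
              have hstep : pv_inner other testing s1 v1 (rm, ic, d, R) p
                  = (true, true, d, R) := by
                simp only [pv_inner]
                rw [if_pos he, if_pos hs,
                  if_neg (show ¬(R.any fun s => (pvGset v1).equal s) = true by rw [← pvCEq]; simp [hR]),
                  if_neg hfam, if_neg (by rw [hfl.1]; simp [h1]), if_pos (by rw [hfl.2]; exact h2)]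
              obtain ⟨rm', hrec⟩ := ih true true d R hR
              refine ⟨rm', ?_⟩
              rw [hstep, hrec,
                ← pv_innerOut_dfss_step other s1 v1 p l d R hm hfp (by simpa using h1) h2]
              simp [hm]
            · -- unique find: cross merge and enter merged mode
              have hstep : pv_inner other testing s1 v1 (rm, ic, d, R) p
                  = (rm, true, d.insert s1 (pvCrossMerge v1 p.2), R ++ [pvGset v1]) := by
                simp only [pv_inner, pvCrossMerge]
                rw [if_pos he, if_pos hs,
                  if_neg (show ¬(R.any fun s => (pvGset v1).equal s) = true by rw [← pvCEq]; simp [hR]),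
                  if_neg hfam, if_neg (by rw [hfl.1]; simp [h1]), if_neg (by rw [hfl.2]; simp [h2])]
              have hR' : pvCEq (R ++ [pvGset v1]) (pvGset v1) = true := by
                simp [pvCEq, pv_equal_refl]
              rw [hstep, pv_inner_merged other testing s1 v1 l rm true _ _ hR']
              refine ⟨rm || l.any (pvIsM s1 (pvGset v1)), ?_⟩
              have hout : pvInnerOut other s1 v1 (p :: l) d R
                  = (d.insert s1 (pvCrossMerge v1 p.2), R ++ [pvGset v1]) := by
                unfold pvInnerOut
                rw [List.find?_cons_of_pos hm]
                dsimp only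
                rw [if_neg (by simp [hfp]), if_neg (by simp [h1, h2])]
              rw [hout]
              simp [hm]
    · have hm : pvIsM s1 (pvGset v1) p = false := by simp [pvIsM, he]
      have hstep : pv_inner other testing s1 v1 (rm, ic, d, R) p = (rm, ic, d, R) := by
        simp only [pv_inner]
        rw [if_neg he]
      obtain ⟨rm', hrec⟩ := ih rm ic d R hR
      exact ⟨rm', by rw [hstep, hrec, pv_innerOut_skip other s1 v1 p l d R hm]; simp [hm]⟩

-- auxiliary find?/any lemmas used to align B's group view with A's first-match view
lemma pv_filter_find? {α : Type} (p r : α → Bool) (l : List α) :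
    (l.filter p).find? r = l.find? (fun x => p x && r x) := by
  induction l with
  | nil => simp
  | cons a l ih =>
    by_cases ha : p a = true
    · by_cases hra : r a = true
      · simp [ha, hra, List.find?_cons_of_pos]
      · simp only [List.filter_cons_of_pos ha]
        rw [List.find?_cons_of_neg (by simp [hra]), List.find?_cons_of_neg (by simp [hra]), ih]
    · rw [List.filter_cons_of_neg (Bool.not_eq_true _ ▸ ha)]
      rw [List.find?_cons_of_neg (by simp [ha]), ih]

lemma pv_find?_eq_head?_filter {α : Type} (p : α → Bool) (l : List α) :
    l.find? p = (l.filter p).head? := by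
  induction l with
  | nil => simp
  | cons a l ih =>
    by_cases ha : p a = true
    · rw [List.find?_cons_of_pos ha, List.filter_cons_of_pos ha, List.head?_cons]
    · rw [List.find?_cons_of_neg (by simp [ha]), List.filter_cons_of_neg (Bool.not_eq_true _ ▸ ha), ih]

lemma pv_any_split {α : Type} (l : List α) (e q : α → Bool) :
    (l.any (fun x => e x && q x) || l.any (fun x => e x && !q x)) = l.any e := by
  induction l with
  | nil => simp
  | cons a l ih =>
    simp only [List.any_cons]
    cases he : e a <;> cases hq : q a <;> simp [he, hq, ← ih]

lemma pv_isEmpty_filter {α : Type} (l : List α) (e : α → Bool) :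
    (l.filter e).isEmpty = !(l.any e) := by
  induction l with
  | nil => simp
  | cons a l ih =>
    cases he : e a <;> simp [he, ih]

-- one step of A's outer loop equals one step of B's loop (on the enriched entry)
lemma pv_step_eq (db_from_self db_from_other : List (String × List String)) (testing : String)
    (st : PySem.Dict String (List String) × List (PySem.Set String)) (p : String × List String) :
    (let r := db_from_self.foldl (pv_inner db_from_other testing p.1 p.2) (false, false, st.1, st.2)
     if r.2.1 = false then (r.2.2.1.insert p.1 p.2, r.2.2.2) else (r.2.2.1, r.2.2.2))
    = (match ((db_from_self.map (fun r => (r.1, r.2, pvGset r.2))).filter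
          (fun q => (!(q.1 == p.1)) && PySem.Set.equal (pvGset p.2) q.2.2)).map (fun q => q.2.1) with
       | [] => (st.1.insert p.1 p.2, st.2)
       | w :: _ =>
         if st.2.any (fun s => PySem.Set.equal (pvGset p.2) s) then (st.1, st.2)
         else
           let other_fams := (db_from_other.filter (fun o => PySem.Set.equal (pvGset p.2) (pvGset o.2))).map
             (fun o => PySem.List.pyGetD o.2 0 "")
           if !other_fams.isEmpty then
             match (((db_from_self.map (fun r => (r.1, r.2, pvGset r.2))).filter
                 (fun q => (!(q.1 == p.1)) && PySem.Set.equal (pvGset p.2) q.2.2)).map (fun q => q.2.1)).find?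
                 (fun w' => PySem.List.pyGetD p.2 0 "" == PySem.List.pyGetD w' 0 "") with
             | some pw => (st.1.insert p.1 (pvFamMerge p.2 pw), st.2 ++ [pvGset p.2])
             | none =>
               if other_fams.contains (PySem.List.pyGetD p.2 0 "") then (st.1.insert p.1 p.2, st.2)
               else (st.1, st.2)
           else
             if PySem.List.pyGetD p.2 0 "" == PySem.List.pyGetD w 0 "" then
               (st.1.insert p.1 (pvFamMerge p.2 w), st.2 ++ [pvGset p.2])
             else (st.1.insert p.1 (pvCrossMerge p.2 w), st.2 ++ [pvGset p.2])) := by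
  have hms : ((db_from_self.map (fun r => (r.1, r.2, pvGset r.2))).filter
        (fun q => (!(q.1 == p.1)) && PySem.Set.equal (pvGset p.2) q.2.2)).map (fun q => q.2.1)
      = (db_from_self.filter (pvIsM p.1 (pvGset p.2))).map (fun r => r.2) := by
    rw [List.filter_map, List.map_map]; rfl
  rw [hms]
  have hempty : ((db_from_other.filter (fun o => PySem.Set.equal (pvGset p.2) (pvGset o.2))).map
        (fun o => PySem.List.pyGetD o.2 0 "")).isEmpty
      = !((pv_overlap_flags (PySem.List.pyGetD p.2 0 "") (pvGset p.2) db_from_other).1 ||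
          (pv_overlap_flags (PySem.List.pyGetD p.2 0 "") (pvGset p.2) db_from_other).2) := by
    rw [List.isEmpty_map, pv_isEmpty_filter, pv_oflags_fst, pv_oflags_snd, pv_any_split]
  have hcont : ((db_from_other.filter (fun o => PySem.Set.equal (pvGset p.2) (pvGset o.2))).map
        (fun o => PySem.List.pyGetD o.2 0 "")).contains (PySem.List.pyGetD p.2 0 "")
      = (pv_overlap_flags (PySem.List.pyGetD p.2 0 "") (pvGset p.2) db_from_other).1 := by
    rw [pv_oflags_fst, List.contains_eq_any_beq, List.any_map, List.any_filter]
    rfl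
  have hfindp : ((db_from_self.filter (pvIsM p.1 (pvGset p.2))).map (fun r => r.2)).find?
        (fun w' => PySem.List.pyGetD p.2 0 "" == PySem.List.pyGetD w' 0 "")
      = Option.map (fun r : String × List String => r.2)
          (db_from_self.find? (fun q' => pvIsM p.1 (pvGset p.2) q' && pvFamP p.2 q')) := by
    rw [List.find?_map, pv_filter_find?]
    rfl
  cases hflt : db_from_self.filter (pvIsM p.1 (pvGset p.2)) with
  | nil =>
    have hany : db_from_self.any (pvIsM p.1 (pvGset p.2)) = false := by
      rw [List.any_eq_false]
      exact fun x hx => List.filter_eq_nil_iff.1 hflt x hx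
    have hfind : db_from_self.find? (pvIsM p.1 (pvGset p.2)) = none := by
      rw [pv_find?_eq_head?_filter, hflt]; rfl
    simp only [List.map_nil]
    by_cases hC : pvCEq st.2 (pvGset p.2) = true
    · rw [pv_inner_merged db_from_other testing p.1 p.2 db_from_self false false st.1 st.2 hC]
      dsimp only
      rw [if_pos (by simp [hany])]
    · obtain ⟨rm', hr⟩ := pv_inner_active db_from_other testing p.1 p.2 db_from_self
        false false st.1 st.2 (Bool.not_eq_true _ ▸ hC)
      rw [hr]
      dsimp only
      rw [if_pos (by simp [hany])]
      unfold pvInnerOut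
      rw [hfind]
  | cons m rest =>
    rw [hflt] at hfindp
    simp only [List.map_cons] at hfindp ⊢
    have hfind : db_from_self.find? (pvIsM p.1 (pvGset p.2)) = some m := by
      rw [pv_find?_eq_head?_filter, hflt]; rfl
    have hmM : pvIsM p.1 (pvGset p.2) m = true := List.find?_some hfind
    have hany : db_from_self.any (pvIsM p.1 (pvGset p.2)) = true := by
      rw [List.any_eq_true]
      exact ⟨m, List.mem_of_find?_eq_some hfind, hmM⟩
    by_cases hC : pvCEq st.2 (pvGset p.2) = true
    · rw [pv_inner_merged db_from_other testing p.1 p.2 db_from_self false false st.1 st.2 hC]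
      dsimp only
      rw [if_neg (by simp [hany]), if_pos (show (st.2.any fun s => (pvGset p.2).equal s) = true from hC)]
    · obtain ⟨rm', hr⟩ := pv_inner_active db_from_other testing p.1 p.2 db_from_self
        false false st.1 st.2 (Bool.not_eq_true _ ▸ hC)
      rw [hr]
      dsimp only
      rw [if_neg (by simp [hany]),
        if_neg (show ¬(st.2.any fun s => (pvGset p.2).equal s) = true from Bool.not_eq_true _ ▸ hC)]
      unfold pvInnerOut
      rw [hfind]
      dsimp only
      by_cases hfp : pvFamP p.2 m = true
      · rw [if_pos hfp, hfindp, pv_find?_and_self hfind hfp]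
        by_cases hor : ((pv_overlap_flags (PySem.List.pyGetD p.2 0 "") (pvGset p.2) db_from_other).1 ||
            (pv_overlap_flags (PySem.List.pyGetD p.2 0 "") (pvGset p.2) db_from_other).2) = true
        · have hOF : (!((db_from_other.filter (fun o => PySem.Set.equal (pvGset p.2) (pvGset o.2))).map
              (fun o => PySem.List.pyGetD o.2 0 "")).isEmpty) = true := by
            rw [hempty, hor]; rfl
          rw [if_pos hOF]
          simp only [Option.map_some]
        · have horf : ((pv_overlap_flags (PySem.List.pyGetD p.2 0 "") (pvGset p.2) db_from_other).1 ||
              (pv_overlap_flags (PySem.List.pyGetD p.2 0 "") (pvGset p.2) db_from_other).2) = false :=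
            Bool.not_eq_true _ ▸ hor
          have hOFn : ¬((!((db_from_other.filter (fun o => PySem.Set.equal (pvGset p.2) (pvGset o.2))).map
              (fun o => PySem.List.pyGetD o.2 0 "")).isEmpty) = true) := by
            rw [hempty, horf]; simp
          rw [if_neg hOFn,
            if_pos (show (PySem.List.pyGetD p.2 0 "" == PySem.List.pyGetD m.2 0 "") = true from hfp)]
      · rw [if_neg hfp]
        by_cases hor : ((pv_overlap_flags (PySem.List.pyGetD p.2 0 "") (pvGset p.2) db_from_other).1 ||
            (pv_overlap_flags (PySem.List.pyGetD p.2 0 "") (pvGset p.2) db_from_other).2) = true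
        · rw [if_pos hor]
          have hOF : (!((db_from_other.filter (fun o => PySem.Set.equal (pvGset p.2) (pvGset o.2))).map
              (fun o => PySem.List.pyGetD o.2 0 "")).isEmpty) = true := by
            rw [hempty, hor]; rfl
          rw [if_pos hOF, hfindp]
          cases hcf : db_from_self.find? (fun q' => pvIsM p.1 (pvGset p.2) q' && pvFamP p.2 q') with
          | none =>
            simp only [Option.map_none]
            rw [hcont]
            by_cases h1 : (pv_overlap_flags (PySem.List.pyGetD p.2 0 "") (pvGset p.2) db_from_other).1 = true
            · rw [if_pos h1, if_pos h1]
            · rw [if_neg h1, if_neg h1]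
          | some f =>
            simp only [Option.map_some]
        · rw [if_neg hor]
          have horf : ((pv_overlap_flags (PySem.List.pyGetD p.2 0 "") (pvGset p.2) db_from_other).1 ||
              (pv_overlap_flags (PySem.List.pyGetD p.2 0 "") (pvGset p.2) db_from_other).2) = false :=
            Bool.not_eq_true _ ▸ hor
          have hOFn : ¬((!((db_from_other.filter (fun o => PySem.Set.equal (pvGset p.2) (pvGset o.2))).map
              (fun o => PySem.List.pyGetD o.2 0 "")).isEmpty) = true) := by
            rw [hempty, horf]; simp
          rw [if_neg hOFn,
            if_neg (show ¬(PySem.List.pyGetD p.2 0 "" == PySem.List.pyGetD m.2 0 "") = true from hfp)]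

-- ===== VERDICT (by name: the statement is the Claim_ definition above) =====
theorem remove_internal_conflict_spec : Claim_equal_remove_internal_conflict := by
  intro db_from_self db_from_other testing _ hpre
  unfold Spec_remove_internal_conflict
  unfold remove_internal_conflict remove_internal_conflict_alt
  dsimp only
  rw [List.foldl_map]
  congr 2
  apply List.foldl_ext
  intro st p hp
  exact pv_step_eq db_from_self db_from_other testing st p
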